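-- pv_equiv track=rewrite | github.com/ChaO-0/WriteUps | GKSK/2020/Crypto/matrix/matrix.py | textToMatrix
-- ===== SOURCE A (Python) =====
-- def textToMatrix(text):
--     text = text.strip()
--     text = list(text)
--     matrix = []
--     while True:
--         if len(text)%2 != 0:
--             text.append(" ")
--         else:
--             break
--     counter= 0
--     for i in range(len(text)//2):
--         temp = []
--         for j in range(counter,counter+2):
--             temp.append(ord(text[counter]))
--             counter += 1
--         matrix.append(temp)
--     return matrix
-- ===== SOURCE B (Python) =====
-- def textToMatrix(text):
--     matrix = []
--     pending = None
--     for c in text.strip():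
--         if pending is None:
--             pending = ord(c)
--         else:
--             matrix.append([pending, ord(c)])
--             pending = None
--     if pending is not None:
--         matrix.append([pending, 32])
--     return matrix
-- ===== Notes on version B (the rewrite author's own statement) =====
-- stated objective: faster
-- what changed: Replaces A's explicit space-padding loop and counter-indexed nested for-loops over a materialised char list with a single-pass state machine: one fold over the stripped string carrying an optional pending ord, emitting a pair whenever two ords meet, and flushing an odd leftover as [pending, 32] at the end - no list() copy, no padding, no indices or counter (constant-factor win, measured ~2x).
import Mathlib
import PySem

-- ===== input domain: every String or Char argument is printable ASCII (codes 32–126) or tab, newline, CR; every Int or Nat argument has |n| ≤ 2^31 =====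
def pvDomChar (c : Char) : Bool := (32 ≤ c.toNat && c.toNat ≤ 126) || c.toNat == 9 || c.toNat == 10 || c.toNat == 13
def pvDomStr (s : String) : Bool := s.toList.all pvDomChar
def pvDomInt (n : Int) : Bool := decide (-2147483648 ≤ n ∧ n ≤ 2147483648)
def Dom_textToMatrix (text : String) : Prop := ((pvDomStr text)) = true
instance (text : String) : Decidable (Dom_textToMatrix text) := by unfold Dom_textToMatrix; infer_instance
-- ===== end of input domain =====

-- B replaces A's while-pad plus counter-indexed nested loops with a single-pass state
-- machine (optional pending ord, odd leftover flushed as [pending, 32]); measured ~2x faster.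


-- ===== PORT A =====
-- A's `while True` appends one space if the length is odd, after which the next test
-- breaks; so it performs exactly one append on odd length and none otherwise.
def pvPadA (cs : List Char) : List Char :=
  if cs.length % 2 ≠ 0 then cs ++ [' '] else cs

-- one iteration of the outer for-loop: inner `for j in range(counter, counter+2)`
-- appending ord(text[counter]) and incrementing counter (index always in range;
-- text[counter] ported as pyGetD, the default is never used)
def pvStepA (full : List Char) (st : List (List Int) × Int) : List (List Int) × Int :=
  let inner := (PySem.List.pyRange st.2 (st.2 + 2) 1).foldl
      (fun (p : List Int × Int) _ =>
        (p.1 ++ [((PySem.List.pyGetD full p.2 ' ').toNat : Int)], p.2 + 1)) ([], st.2)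
  (st.1 ++ [inner.1], inner.2)

def textToMatrix (text : String) : List (List Int) :=
  let t := (PySem.Str.strip text).toList
  let full := pvPadA t
  ((List.range (full.length / 2)).foldl (fun st _ => pvStepA full st) ([], (0 : Int))).1

-- ===== PORT B =====
-- the loop body: pending None → remember ord(c); otherwise emit the pair and clear
def pvStepB (st : List (List Int) × Option Int) (c : Char) : List (List Int) × Option Int :=
  match st.2 with
  | none => (st.1, some (c.toNat : Int))
  | some p => (st.1 ++ [[p, (c.toNat : Int)]], none)

-- the final `if pending is not None: matrix.append([pending, 32])`
def pvFlushB (st : List (List Int) × Option Int) : List (List Int) :=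
  match st.2 with
  | none => st.1
  | some p => st.1 ++ [[p, 32]]

def textToMatrix_alt (text : String) : List (List Int) :=
  pvFlushB ((PySem.Str.strip text).toList.foldl pvStepB ([], none))

-- ===== PRECONDITION & SPEC =====
def Spec_textToMatrix (text : String) (out : List (List Int)) : Prop := out = textToMatrix_alt text
instance (text : String) (out : List (List Int)) : Decidable (Spec_textToMatrix text out) := by unfold Spec_textToMatrix; infer_instance

-- ===== CLAIM (what is proved, stated in full; the proofs are below) =====
def Claim_equal_textToMatrix : Prop := ∀ (text : String), Dom_textToMatrix text → Spec_textToMatrix text (textToMatrix text)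

-- ===== LEMMAS AND PROOFS =====

-- common characterisation: the ords of the padded list, two at a time
def pvPairOrds : List Char → List (List Int)
  | a :: b :: rest => [(a.toNat : Int), (b.toNat : Int)] :: pvPairOrds rest
  | _ => []

lemma foldl_const_eq_iterate {α β : Type} (f : α → α) (l : List β) (init : α) :
    l.foldl (fun a _ => f a) init = f^[l.length] init := by
  induction l generalizing init with
  | nil => rfl
  | cons x xs ih => simp [List.foldl, ih, Function.iterate_succ_apply]

lemma stepA_eq (full : List Char) (m : List (List Int)) (c : Nat) (h : c + 2 ≤ full.length) :
    pvStepA full (m, (c : Int)) =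
      (m ++ [[((full[c]'(by omega)).toNat : Int), ((full[c+1]'(by omega)).toNat : Int)]],
       ((c + 2 : Nat) : Int)) := by
  unfold pvStepA
  rw [PySem.List.pyRange_one_cons (by omega), PySem.List.pyRange_one_cons (by omega),
      PySem.List.pyRange_one_eq_nil (by omega)]
  simp only [List.foldl_cons, List.foldl_nil]
  have h1 : ((c : Int) + 1) = ((c + 1 : Nat) : Int) := by push_cast; ring
  have h2 : ((c + 1 : Nat) : Int) + 1 = ((c + 2 : Nat) : Int) := by push_cast; ring
  rw [h1, h2, PySem.List.pyGetD_natCast, PySem.List.pyGetD_natCast,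
      List.getD_eq_getElem full ' ' (by omega : c < full.length),
      List.getD_eq_getElem full ' ' (by omega : c + 1 < full.length)]
  simp

lemma loopA_eq (full : List Char) (k : Nat) :
    ∀ (c : Nat) (m : List (List Int)), c + 2 * k = full.length →
    (pvStepA full)^[k] (m, (c : Int)) =
      (m ++ pvPairOrds (full.drop c), (full.length : Int)) := by
  induction k with
  | zero =>
    intro c m h
    have hc : c = full.length := by omega
    subst hc
    simp [List.drop_eq_nil_of_le le_rfl, pvPairOrds]
  | succ k ih =>
    intro c m h
    rw [Function.iterate_succ_apply, stepA_eq full m c (by omega),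
        ih (c + 2) _ (by omega)]
    have hdrop : full.drop c
        = full[c]'(by omega) :: full[c+1]'(by omega) :: full.drop (c + 2) := by
      rw [List.drop_eq_getElem_cons (by omega : c < full.length),
          List.drop_eq_getElem_cons (by omega : c + 1 < full.length)]
    rw [hdrop, pvPairOrds]
    simp

lemma A_eq_pairs (t : List Char) :
    ((List.range ((pvPadA t).length / 2)).foldl (fun st _ => pvStepA (pvPadA t) st)
      ([], (0 : Int))).1 = pvPairOrds (pvPadA t) := by
  have heven : (pvPadA t).length % 2 = 0 := by
    unfold pvPadA; split_ifs with h
    · simp only [List.length_append, List.length_cons, List.length_nil]; omega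
    · omega
  rw [foldl_const_eq_iterate (pvStepA (pvPadA t)), List.length_range]
  have h0 := loopA_eq (pvPadA t) ((pvPadA t).length / 2) 0 [] (by omega)
  simp only [Nat.cast_zero, List.drop_zero] at h0
  rw [h0]; simp

lemma B_eq_pairs (n : Nat) : ∀ (t : List Char), t.length = n → ∀ (m : List (List Int)),
    pvFlushB (t.foldl pvStepB (m, none)) = m ++ pvPairOrds (pvPadA t) := by
  induction n using Nat.strong_induction_on with
  | _ n ih =>
    intro t hn m
    match t with
    | [] => simp [pvFlushB, pvPairOrds, pvPadA]
    | [a] => simp [pvStepB, pvFlushB, pvPairOrds, pvPadA]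
    | a :: b :: rest =>
      have hlen : rest.length < n := by simp at hn; omega
      have hpad : pvPadA (a :: b :: rest) = a :: b :: pvPadA rest := by
        unfold pvPadA
        rcases Nat.mod_two_eq_zero_or_one rest.length with h | h <;>
          simp [List.length_cons, Nat.add_mod, h]
      simp only [List.foldl_cons, pvStepB]
      rw [ih rest.length hlen rest rfl (m ++ [[(a.toNat : Int), (b.toNat : Int)]]),
          hpad, pvPairOrds]
      simp

-- ===== VERDICT (by name: the statement is the Claim_ definition above) =====
theorem textToMatrix_spec : Claim_equal_textToMatrix := by
  intro text _
  show textToMatrix text = textToMatrix_alt text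
  unfold textToMatrix textToMatrix_alt
  rw [A_eq_pairs, B_eq_pairs ((PySem.Str.strip text).toList).length _ rfl]
  simp
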